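-- pv_equiv track=rewrite | github.com/rgabrielsson/Lab10_whileItsBroken | elements.py | getUnits
-- ===== SOURCE A (Python) =====
-- import string
--
-- def getUnits(formula):
--     elements = []
--     while formula != "":
--         new_element = formula[0]
--         formula = formula[1:]
--         while formula != "":
--             if formula[0] not in string.ascii_uppercase:
--                 new_element += formula[0]
--                 formula = formula[1:]
--             else:
--                 break
--         elements.append(new_element)
--     return elements
-- ===== SOURCE B (Python) =====
-- import re
--
-- def getUnits(formula):
--     return re.findall(r'.[^A-Z]*', formula, re.DOTALL)
-- ===== Notes on version B (the rewrite author's own statement) =====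
-- stated objective: faster
-- what changed: Replaced the hand-written nested while loops that slice the string character by character with a single regex tokenization re.findall(r'.[^A-Z]*', formula, re.DOTALL).
import Mathlib
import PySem

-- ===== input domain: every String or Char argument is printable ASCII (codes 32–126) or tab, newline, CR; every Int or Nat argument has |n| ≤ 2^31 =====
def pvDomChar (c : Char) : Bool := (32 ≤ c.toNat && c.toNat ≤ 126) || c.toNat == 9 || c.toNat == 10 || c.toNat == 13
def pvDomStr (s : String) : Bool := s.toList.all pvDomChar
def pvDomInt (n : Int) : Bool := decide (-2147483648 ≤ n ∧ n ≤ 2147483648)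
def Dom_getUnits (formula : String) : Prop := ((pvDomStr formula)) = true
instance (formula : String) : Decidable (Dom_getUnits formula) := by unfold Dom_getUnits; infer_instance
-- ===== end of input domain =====

-- B replaces A's nested character-slicing while loops with a single regex tokenization ('.[^A-Z]*' with DOTALL); objective: faster (linear scan vs repeated slicing).


-- ===== PORT A =====
-- string.ascii_uppercase
def pvAsciiUppercase : List Char := "ABCDEFGHIJKLMNOPQRSTUVWXYZ".toList

-- the inner while loop of A: grows new_element, consumes formula until it hits an uppercase letter
def getUnitsInner (newElement : List Char) (formula : List Char) : List Char × List Char :=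
  match formula with
  | [] => (newElement, [])
  | c :: rest =>
      if c ∉ pvAsciiUppercase then getUnitsInner (newElement ++ [c]) rest
      else (newElement, c :: rest)

theorem getUnitsInner_snd_len (a : List Char) (f : List Char) :
    (getUnitsInner a f).2.length ≤ f.length := by
  induction f generalizing a with
  | nil => simp [getUnitsInner]
  | cons c rest ih =>
      simp only [getUnitsInner]
      split
      · exact Nat.le_trans (ih _) (Nat.le_succ _)
      · simp

-- the outer while loop of A
def getUnitsOuter (elements : List String) (formula : List Char) : List String :=
  match formula with
  | [] => elements
  | c :: rest =>
      let p := getUnitsInner [c] rest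
      getUnitsOuter (elements ++ [String.ofList p.1]) p.2
termination_by formula.length
decreasing_by
  simpa using Nat.lt_succ_of_le (getUnitsInner_snd_len [c] rest)

def getUnits (formula : String) : List String := getUnitsOuter [] formula.toList

-- ===== PORT B =====
-- the regex character class A-Z (its denotation, the 26 uppercase ASCII letters) and its negation [^A-Z]
def pvClassAZ : List Char :=
  ['A','B','C','D','E','F','G','H','I','J','K','L','M','N','O','P','Q','R','S','T','U','V','W','X','Y','Z']
def pvNotUp (c : Char) : Bool := !(c ∈ pvClassAZ)

-- re.findall(r'.[^A-Z]*', formula, re.DOTALL): each match is one char ('.', DOTALL)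
-- followed by the maximal (greedy) run of non-uppercase characters
def getUnitsTok (formula : List Char) : List String :=
  match formula with
  | [] => []
  | c :: rest =>
      String.ofList (c :: rest.takeWhile pvNotUp) :: getUnitsTok (rest.dropWhile pvNotUp)
termination_by formula.length
decreasing_by
  simpa using Nat.lt_succ_of_le (rest.length_dropWhile_le pvNotUp)

def getUnits_alt (formula : String) : List String := getUnitsTok formula.toList

-- ===== PRECONDITION & SPEC =====
def Spec_getUnits (formula : String) (out : List String) : Prop := out = getUnits_alt formula
instance (formula : String) (out : List String) : Decidable (Spec_getUnits formula out) := by unfold Spec_getUnits; infer_instance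

-- ===== CLAIM (what is proved, stated in full; the proofs are below) =====
def Claim_equal_getUnits : Prop := ∀ (formula : String), Dom_getUnits formula → Spec_getUnits formula (getUnits formula)

-- ===== LEMMAS AND PROOFS =====
theorem upper_lists_eq : pvAsciiUppercase = pvClassAZ := by decide

theorem mem_upper_iff (c : Char) : (c ∈ pvAsciiUppercase) ↔ ¬ pvNotUp c = true := by
  rw [upper_lists_eq]
  simp [pvNotUp]

theorem getUnitsInner_eq (a : List Char) (f : List Char) :
    getUnitsInner a f = (a ++ f.takeWhile pvNotUp, f.dropWhile pvNotUp) := by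
  induction f generalizing a with
  | nil => simp [getUnitsInner]
  | cons c rest ih =>
      by_cases hc : pvNotUp c = true
      · have hmem : c ∉ pvAsciiUppercase := by
          intro hin; exact ((mem_upper_iff c).mp hin) hc
        simp [getUnitsInner, hmem, List.takeWhile, List.dropWhile, hc, ih]
      · have hmem : c ∈ pvAsciiUppercase := (mem_upper_iff c).mpr hc
        simp [getUnitsInner, hmem, List.takeWhile, List.dropWhile, hc]

theorem getUnitsOuter_eq (acc : List String) (f : List Char) :
    getUnitsOuter acc f = acc ++ getUnitsTok f := by
  induction hn : f.length using Nat.strong_induction_on generalizing acc f with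
  | _ n ih =>
    match f with
    | [] => simp [getUnitsOuter, getUnitsTok]
    | c :: rest =>
        rw [getUnitsOuter, getUnitsTok, getUnitsInner_eq]
        rw [ih (rest.dropWhile pvNotUp).length
              (by subst hn; simpa using Nat.lt_succ_of_le (rest.length_dropWhile_le pvNotUp))
              _ _ rfl]
        simp

-- ===== VERDICT (by name: the statement is the Claim_ definition above) =====
theorem getUnits_spec : Claim_equal_getUnits := by
  intro formula _
  unfold Spec_getUnits getUnits getUnits_alt
  simpa using getUnitsOuter_eq [] formula.toList
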